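-- pv_equiv track=rewrite | github.com/efcarrizo/UTNfrc | simulacro parcial 2 version 2/simulacro2p2.py | long_p_long
-- ===== SOURCE A (Python) =====
-- def long_p_long(linea):
--
--     digitos = "0123456789"
--
--     #Flags
--     digito = False
--     letter_p = False
--
--     #Contadores
--     chars = 0
--     long = None
--
--     for l in linea:
--         if l != " " and l != ".":
--             #Sumamos todas las letras dentro de la palabra
--             chars += 1
--
--             if l in digitos:
--                 digito = True
--
--             if l.lower() == "p":
--                 letter_p = True
--
--
--         else:
--             if digito and not letter_p:
--                 if long == None or  chars > long:
--                     long = chars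
--
--             digito = False
--             letter_p = False
--             chars = 0
--
--     return long
--
--
--
--
--
--     pass
-- ===== SOURCE B (Python) =====
-- def long_p_long(linea):
--     # Tokenize first (split on ' ' and '.'), then scan whole tokens.
--     # The trailing unterminated token is never completed by a delimiter,
--     # so it is not appended (it never counts).
--     tokens = []
--     cur = ""
--     for ch in linea:
--         if ch in " .":
--             tokens.append(cur)
--             cur = ""
--         else:
--             cur += ch
--     best = None
--     for w in tokens:
--         if any(c in "0123456789" for c in w) and 'p' not in w.lower():
--             if best is None or len(w) > best:
--                 best = len(w)
--     return best
-- ===== Notes on version B (the rewrite author's own statement) =====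
-- stated objective: alternative
-- what changed: Replaces A's single-pass character scan with per-word boolean flags and a running counter by a two-phase tokenize-then-scan: first split the line into its delimiter-terminated tokens, then test each whole token (any digit, no 'p'/'P') and track the maximum length.
import Mathlib
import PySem

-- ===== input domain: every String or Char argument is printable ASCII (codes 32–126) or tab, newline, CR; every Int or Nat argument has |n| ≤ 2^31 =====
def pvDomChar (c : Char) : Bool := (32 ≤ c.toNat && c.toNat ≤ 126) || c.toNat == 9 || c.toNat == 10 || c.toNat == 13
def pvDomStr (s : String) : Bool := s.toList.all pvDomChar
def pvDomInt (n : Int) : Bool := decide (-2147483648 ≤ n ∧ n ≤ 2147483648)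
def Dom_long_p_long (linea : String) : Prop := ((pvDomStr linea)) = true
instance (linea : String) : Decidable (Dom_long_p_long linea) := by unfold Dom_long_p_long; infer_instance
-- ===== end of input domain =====

-- B replaces A's per-character flag/counter scan by a tokenize-then-scan-tokens
-- decomposition (alternative decomposition, same cost).


-- ===== PORT A =====
-- state: (digito, letter_p, chars, long)
def pvStepA (s : Bool × Bool × Int × Option Int) (l : Char) : Bool × Bool × Int × Option Int :=
  if l ≠ ' ' ∧ l ≠ '.' then
    let chars := s.2.2.1 + 1
    let digito := if PySem.Chars.isIn [l] ("0123456789".toList) then true else s.1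
    let letter_p := if PySem.Chars.lowerChar l = 'p' then true else s.2.1
    (digito, letter_p, chars, s.2.2.2)
  else
    let long :=
      if s.1 = true ∧ s.2.1 = false then
        match s.2.2.2 with
        | none => some s.2.2.1
        | some v => if s.2.2.1 > v then some s.2.2.1 else s.2.2.2
      else s.2.2.2
    (false, false, 0, long)

def long_p_long (linea : String) : Option Int :=
  (linea.toList.foldl pvStepA (false, false, 0, none)).2.2.2

-- ===== PORT B =====
-- phase 1: tokenize; state (tokens, cur)
def pvTokStep (s : List (List Char) × List Char) (ch : Char) : List (List Char) × List Char :=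
  if PySem.Chars.isIn [ch] (" .".toList) then (s.1 ++ [s.2], []) else (s.1, s.2 ++ [ch])

-- phase 2: whole-token test
def pvQualifies (w : List Char) : Bool :=
  (w.any fun c => PySem.Chars.isIn [c] ("0123456789".toList))
    && !(PySem.Chars.isIn ['p'] (PySem.Chars.lower w))

def pvScanStep (best : Option Int) (w : List Char) : Option Int :=
  if pvQualifies w then
    match best with
    | none => some (w.length : Int)
    | some v => if (w.length : Int) > v then some (w.length : Int) else best
  else best

def long_p_long_alt (linea : String) : Option Int :=
  ((linea.toList.foldl pvTokStep ([], [])).1).foldl pvScanStep none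

-- ===== PRECONDITION & SPEC =====
def Spec_long_p_long (linea : String) (out : Option Int) : Prop := out = long_p_long_alt linea
instance (linea : String) (out : Option Int) : Decidable (Spec_long_p_long linea out) := by unfold Spec_long_p_long; infer_instance

-- ===== CLAIM (what is proved, stated in full; the proofs are below) =====
def Claim_equal_long_p_long : Prop := ∀ (linea : String), Dom_long_p_long linea → Spec_long_p_long linea (long_p_long linea)

-- ===== LEMMAS AND PROOFS =====

-- 'c in s' for a single character is plain membership
theorem pv_isIn_singleton (a : Char) (s : List Char) :
    PySem.Chars.isIn [a] s = s.contains a := by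
  have h1 : PySem.Chars.isIn [a] s = true ↔ a ∈ s := by
    rw [PySem.Chars.isIn_iff_infix]
    constructor
    · rintro ⟨l, r, rfl⟩; simp
    · intro h
      obtain ⟨l, r, rfl⟩ := List.append_of_mem h
      exact ⟨l, r, by simp⟩
  by_cases h : a ∈ s
  · simp [h1.mpr h, h]
  · have : PySem.Chars.isIn [a] s ≠ true := fun hc => h (h1.mp hc)
    simp only [Bool.not_eq_true] at this
    simp [this, h]

-- the completed tokens a tokenization pass produces, given the pending word w
def pvTokGo : List Char → List Char → List (List Char)
  | [], _ => []
  | c :: cs, w =>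
      if PySem.Chars.isIn [c] (" .".toList) then w :: pvTokGo cs [] else pvTokGo cs (w ++ [c])

theorem pv_tok_fst : ∀ (cs : List Char) (ts : List (List Char)) (w : List Char),
    (cs.foldl pvTokStep (ts, w)).1 = ts ++ pvTokGo cs w := by
  intro cs
  induction cs with
  | nil => intro ts w; simp [pvTokGo]
  | cons c cs ih =>
      intro ts w
      by_cases h : PySem.Chars.isIn [c] ([' ', '.']) = true
      · simp [pvTokStep, pvTokGo, h, ih]
      · simp only [Bool.not_eq_true] at h
        simp [pvTokStep, pvTokGo, h, ih]

-- A's two flags, as functions of the pending word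
def pvFlagD (w : List Char) : Bool := w.any fun c => PySem.Chars.isIn [c] ("0123456789".toList)
def pvFlagP (w : List Char) : Bool := w.any fun c => PySem.Chars.lowerChar c = 'p'

theorem pv_qualifies_flags (w : List Char) :
    pvQualifies w = (pvFlagD w && !pvFlagP w) := by
  unfold pvQualifies pvFlagD pvFlagP
  rw [pv_isIn_singleton]
  simp [PySem.Chars.lower, List.any_eq]

theorem pv_main : ∀ (cs w : List Char) (best : Option Int),
    (cs.foldl pvStepA (pvFlagD w, pvFlagP w, (w.length : Int), best)).2.2.2
      = (pvTokGo cs w).foldl pvScanStep best := by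
  intro cs
  induction cs with
  | nil => intro w best; simp [pvTokGo]
  | cons c cs ih =>
      intro w best
      by_cases h : PySem.Chars.isIn [c] ([' ', '.']) = true
      · have hc : c = ' ' ∨ c = '.' := by
          rw [pv_isIn_singleton] at h
          simpa using h
        have hstep : pvStepA (pvFlagD w, pvFlagP w, (w.length : Int), best) c
            = (pvFlagD [], pvFlagP [], (([] : List Char).length : Int), pvScanStep best w) := by
          have hcond : ¬ (c ≠ ' ' ∧ c ≠ '.') := by rcases hc with rfl | rfl <;> simp
          simp only [pvStepA, if_neg hcond, pvScanStep, pv_qualifies_flags, pvFlagD, pvFlagP]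
          rcases hd : w.any fun c => PySem.Chars.isIn [c] ("0123456789".toList) <;>
            rcases hp : w.any fun c => PySem.Chars.lowerChar c = 'p' <;> simp
        rw [List.foldl_cons, hstep, ih]
        simp [pvTokGo, h]
      · simp only [Bool.not_eq_true] at h
        have hc : ¬ (c = ' ' ∨ c = '.') := by
          rw [pv_isIn_singleton] at h
          simpa using h
        have hc1 : c ≠ ' ' := fun e => hc (Or.inl e)
        have hc2 : c ≠ '.' := fun e => hc (Or.inr e)
        have e1 : ∀ (b : Bool),
            (if PySem.Chars.isIn [c] ("0123456789".toList) = true then true else b)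
              = (b || PySem.Chars.isIn [c] ("0123456789".toList)) := by
          intro b; cases PySem.Chars.isIn [c] ("0123456789".toList) <;> simp
        have e2 : ∀ (b : Bool),
            (if PySem.Chars.lowerChar c = 'p' then true else b)
              = (b || decide (PySem.Chars.lowerChar c = 'p')) := by
          intro b; by_cases hp : PySem.Chars.lowerChar c = 'p' <;> simp [hp]
        have hstep : pvStepA (pvFlagD w, pvFlagP w, (w.length : Int), best) c
            = (pvFlagD (w ++ [c]), pvFlagP (w ++ [c]), ((w ++ [c]).length : Int), best) := by
          simp only [pvStepA, if_pos (And.intro hc1 hc2), pvFlagD, pvFlagP, List.any_append,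
            List.any_cons, List.any_nil, Bool.or_false, e1, e2, Prod.mk.injEq,
            List.length_append, List.length_cons, List.length_nil]
          refine ⟨trivial, trivial, ?_, trivial⟩; push_cast; ring
        rw [List.foldl_cons, hstep, ih]
        simp [pvTokGo, h]

-- ===== VERDICT (by name: the statement is the Claim_ definition above) =====
theorem long_p_long_spec : Claim_equal_long_p_long := by
  intro linea _
  unfold Spec_long_p_long long_p_long long_p_long_alt
  rw [pv_tok_fst linea.toList [] []]
  have := pv_main linea.toList [] none
  simpa [pvFlagD, pvFlagP] using this
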